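-- pv_equiv track=rewrite | github.com/haonanwu123/pythonoefenen | Orbitalsunvery/orbitalsurvery.py | find_highest_consecutive
-- ===== SOURCE A (Python) =====
-- def find_highest_consecutive(columns: list, value: str) -> list:
--     """
--     Find the highest number of consecutive values of 'value' in the columns
--     :param columns: The columns to search
--     :param value: The value to find
--     :return: The highest count of consecutive instances of 'value' for each column
--     """
--
--     highest_counts = []
--     for column in columns:
--         highest_cnt = 0
--         for idx in range(-1, 0 - len(column) - 1, -1):
--             v_ = column[idx]
--             if v_ == value:
--                 highest_cnt += 1
--             else:
--                 break
--         highest_counts.append(highest_cnt)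
--
--     return highest_counts
-- ===== SOURCE B (Python) =====
-- def find_highest_consecutive(columns: list, value: str) -> list:
--     """Forward scan: keep a running counter, reset on mismatch; after the
--     full pass it holds the trailing-run length."""
--     result = []
--     for column in columns:
--         run = 0
--         for v in column:
--             run = run + 1 if v == value else 0
--         result.append(run)
--     return result
-- ===== Notes on version B (the rewrite author's own statement) =====
-- stated objective: alternative
-- what changed: Replaces A's backward scan over negative indices with early break by a forward full scan with a reset-on-mismatch counter whose final value is the trailing-run length.
import Mathlib
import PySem

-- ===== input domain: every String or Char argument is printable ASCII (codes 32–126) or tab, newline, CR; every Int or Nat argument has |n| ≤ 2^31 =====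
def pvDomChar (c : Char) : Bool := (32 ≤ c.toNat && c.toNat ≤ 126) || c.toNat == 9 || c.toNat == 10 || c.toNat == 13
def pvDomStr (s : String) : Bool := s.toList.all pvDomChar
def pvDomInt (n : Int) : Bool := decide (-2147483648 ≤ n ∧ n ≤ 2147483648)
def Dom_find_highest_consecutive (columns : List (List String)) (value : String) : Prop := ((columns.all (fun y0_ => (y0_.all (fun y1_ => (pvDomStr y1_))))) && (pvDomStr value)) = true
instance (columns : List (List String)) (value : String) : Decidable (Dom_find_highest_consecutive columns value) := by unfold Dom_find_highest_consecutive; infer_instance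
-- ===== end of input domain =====

-- B replaces A's backward scan with early break by a forward full scan with a
-- reset-on-mismatch counter (alternative decomposition, same cost).

-- ===== PORT A =====
-- inner 'for idx in range(-1, -len-1, -1)' with break: recursion over the range
-- list; column[idx] via pyGet? (exact; the 'none' branch is unreachable since
-- every produced index is in range, so Python never raises here)
def pvACount (column : List String) (value : String) : List Int → Int → Int
  | [], cnt => cnt
  | idx :: rest, cnt =>
    match PySem.List.pyGet? column idx with
    | some v_ => if v_ = value then pvACount column value rest (cnt + 1) else cnt
    | none => cnt

def find_highest_consecutive (columns : List (List String)) (value : String) : List Int :=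
  columns.foldl (fun highest_counts column =>
    highest_counts ++ [pvACount column value
      (PySem.List.pyRange (-1) (0 - (column.length : Int) - 1) (-1)) 0]) []

-- ===== PORT B =====
def pvBCount (value : String) (column : List String) : Int :=
  column.foldl (fun run v => if v = value then run + 1 else 0) 0

def find_highest_consecutive_alt (columns : List (List String)) (value : String) : List Int :=
  columns.foldl (fun result column => result ++ [pvBCount value column]) []

-- ===== PRECONDITION & SPEC =====
def Spec_find_highest_consecutive (columns : List (List String)) (value : String) (out : List Int) : Prop := out = find_highest_consecutive_alt columns value
instance (columns : List (List String)) (value : String) (out : List Int) : Decidable (Spec_find_highest_consecutive columns value out) := by unfold Spec_find_highest_consecutive; infer_instance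

-- ===== CLAIM (what is proved, stated in full; the proofs are below) =====
def Claim_equal_find_highest_consecutive : Prop := ∀ (columns : List (List String)) (value : String), Dom_find_highest_consecutive columns value → Spec_find_highest_consecutive columns value (find_highest_consecutive columns value)

-- ===== LEMMAS AND PROOFS =====

-- length of the leading run of `value` in a list (reference function)
def pvLead (value : String) : List String → Int
  | [] => 0
  | v :: rest => if v = value then 1 + pvLead value rest else 0

-- B counts the leading run of the reverse (= trailing run)
theorem pvBCount_eq_lead (value : String) (column : List String) :
    pvBCount value column = pvLead value column.reverse := by
  induction column using List.reverseRecOn with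
  | nil => simp [pvBCount, pvLead]
  | append_singleton l v ih =>
    simp only [pvBCount, List.foldl_append, List.foldl_cons, List.foldl_nil,
      List.reverse_append, List.reverse_singleton, List.singleton_append, pvLead]
    by_cases h : v = value
    · simp [h, ← ih, pvBCount]; omega
    · simp [h]

-- A's backward scan from index -1-j counts the leading run of reverse.drop j
theorem pvACount_eq_lead (value : String) (column : List String) :
    ∀ (k j : Nat) (cnt : Int), column.length - j = k → j ≤ column.length →
    pvACount column value
      (PySem.List.pyRange (-1 - (j : Int)) (0 - (column.length : Int) - 1) (-1)) cnt
    = cnt + pvLead value (column.reverse.drop j) := by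
  intro k
  induction k with
  | zero =>
    intro j cnt hk hj
    have hj' : j = column.length := by omega
    rw [PySem.List.pyRange_neg_one_eq_nil (by omega)]
    simp only [pvACount, hj']
    rw [show column.length = column.reverse.length by simp, List.drop_length]
    simp [pvLead]
  | succ k ih =>
    intro j cnt hk hj
    have hjlt : j < column.length := by omega
    rw [PySem.List.pyRange_neg_one_cons (by omega)]
    have hget : PySem.List.pyGet? column (-1 - (j : Int)) =
        some (column.reverse[j]'(by simpa using hjlt)) := by
      have h1 : (-1 - (j : Int)) = -(((j + 1 : Nat) : Int)) := by push_cast; ring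
      rw [h1, PySem.List.pyGet?_neg_natCast column (j + 1) (by omega) (by omega)]
      rw [List.getElem?_eq_getElem (by omega)]
      congr 1
      rw [List.getElem_reverse]
      congr 1
      omega
    have hdrop : column.reverse.drop j =
        column.reverse[j]'(by simpa using hjlt) :: column.reverse.drop (j + 1) :=
      List.drop_eq_getElem_cons (by simpa using hjlt)
    simp only [pvACount, hget]
    by_cases h : column.reverse[j]'(by simpa using hjlt) = value
    · rw [if_pos h]
      have h2 : -1 - (j : Int) - 1 = -1 - ((j + 1 : Nat) : Int) := by push_cast; ring
      rw [h2, ih (j + 1) (cnt + 1) (by omega) (by omega), hdrop, pvLead]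
      rw [if_pos h]
      ring
    · rw [if_neg h, hdrop, pvLead, if_neg h]
      ring

theorem pvACount_eq_pvBCount (value : String) (column : List String) :
    pvACount column value
      (PySem.List.pyRange (-1) (0 - (column.length : Int) - 1) (-1)) 0
    = pvBCount value column := by
  have h := pvACount_eq_lead value column column.length 0 0 (by omega) (by omega)
  norm_num at h
  rw [pvBCount_eq_lead, show (0 : Int) - (column.length : Int) - 1 = -(column.length : Int) - 1 by ring]
  exact h

theorem pvPorts_agree (columns : List (List String)) (value : String) :
    find_highest_consecutive columns value = find_highest_consecutive_alt columns value := by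
  unfold find_highest_consecutive find_highest_consecutive_alt
  induction columns using List.reverseRecOn with
  | nil => rfl
  | append_singleton l c ih =>
    rw [List.foldl_append, List.foldl_append, List.foldl_cons, List.foldl_cons,
      List.foldl_nil, List.foldl_nil, ih, pvACount_eq_pvBCount]

-- ===== VERDICT (by name: the statement is the Claim_ definition above) =====
theorem find_highest_consecutive_spec : Claim_equal_find_highest_consecutive := by
  intro columns value _
  exact pvPorts_agree columns value
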